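-- pv_equiv track=rewrite | github.com/zuaird/sarjy | backend/memory.py | apply_updates
-- ===== SOURCE A (Python) =====
-- def apply_updates(memory, updates):
--     for k, v in updates.items():
--
--         if k == "todos":
--             memory.setdefault("todos", [])
--             memory["todos"].extend(v)
--
--         else:
--             memory[k] = v
--
--     return memory
-- ===== SOURCE B (Python) =====
-- def apply_updates(memory, updates):
--     # Rebuild the merged mapping by a pass over memory (rewriting each entry
--     # from updates, concatenating the todos lists), then append the keys of
--     # updates that are new, and install the result into the same dict object.
--     merged = {}
--     for k, old in memory.items():
--         if k == "todos" and "todos" in updates: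
--             merged[k] = old + updates["todos"]
--         elif k in updates:
--             merged[k] = updates[k]
--         else:
--             merged[k] = old
--     for k, v in updates.items():
--         if k not in memory:
--             merged[k] = v
--     memory.clear()
--     memory.update(merged)
--     return memory
-- ===== Notes on version B (the rewrite author's own statement) =====
-- stated objective: alternative
-- what changed: A does one interleaved pass over updates that mutates memory per key (setdefault+extend for 'todos', assignment otherwise); B instead rebuilds the result from scratch by traversing memory first (rewriting each kept entry from updates, concatenating the todos lists) and then appending the fresh keys of updates, finally installing the rebuilt mapping into the same dict object.
import Mathlib
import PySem

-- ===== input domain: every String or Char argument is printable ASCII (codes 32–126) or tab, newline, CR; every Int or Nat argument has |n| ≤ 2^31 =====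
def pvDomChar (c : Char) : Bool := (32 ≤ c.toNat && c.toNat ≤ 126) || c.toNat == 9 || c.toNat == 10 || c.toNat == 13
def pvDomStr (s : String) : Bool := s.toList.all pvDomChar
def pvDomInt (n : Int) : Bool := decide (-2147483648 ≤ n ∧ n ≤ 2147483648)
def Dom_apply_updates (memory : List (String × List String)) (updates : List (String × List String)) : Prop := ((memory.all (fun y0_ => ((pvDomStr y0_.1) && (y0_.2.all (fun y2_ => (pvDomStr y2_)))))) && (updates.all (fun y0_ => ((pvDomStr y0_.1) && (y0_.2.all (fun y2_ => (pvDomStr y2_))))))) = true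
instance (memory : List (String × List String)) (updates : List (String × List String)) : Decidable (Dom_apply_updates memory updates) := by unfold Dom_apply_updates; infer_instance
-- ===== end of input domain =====

-- B replaces A's per-key branch-and-mutate loop over `updates` by rebuilding the
-- mapping from scratch: one pass over `memory` (rewriting each kept entry from
-- `updates`, concatenating the todos lists) followed by appending the fresh keys
-- of `updates`; equivalence is about the RETURN value (both leave the same
-- contents in the same dict object; A extends the old todos list object in
-- place, B rebinds the key to a fresh list).
-- ===== PORT A =====
def apply_updates (memory : List (String × List String)) (updates : List (String × List String)) : List (String × List String) :=
  (updates.foldl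
    (fun d kv =>
      if kv.1 == "todos" then
        ((d.setdefault "todos" []).modify "todos" [] (fun t => t ++ kv.2))
      else
        d.insert kv.1 kv.2)
    (PySem.Dict.mk memory)).items

-- ===== PORT B =====
def apply_updates_alt (memory : List (String × List String)) (updates : List (String × List String)) : List (String × List String) :=
  let u : PySem.Dict String (List String) := PySem.Dict.mk updates
  let mem : PySem.Dict String (List String) := PySem.Dict.mk memory
  let merged : PySem.Dict String (List String) :=
    memory.foldl
      (fun m p =>
        m.insert p.1
          (if p.1 == "todos" && u.contains "todos" then p.2 ++ u.getD "todos" []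
           else if u.contains p.1 then u.getD p.1 []
           else p.2))
      PySem.Dict.empty
  (updates.foldl
    (fun m kv => if mem.contains kv.1 then m else m.insert kv.1 kv.2)
    merged).items

-- ===== PRECONDITION & SPEC =====
-- Pre_ excludes association lists with a repeated key (in memory or updates):
-- such lists represent no Python dict (dict keys are unique); on them A's
-- overwrite-every-occurrence and B's one-entry-per-key rebuild accidentally differ.
def Pre_apply_updates (memory : List (String × List String)) (updates : List (String × List String)) : Prop :=
  (memory.map Prod.fst).Nodup ∧ (updates.map Prod.fst).Nodup
instance (memory : List (String × List String)) (updates : List (String × List String)) : Decidable (Pre_apply_updates memory updates) := by unfold Pre_apply_updates; infer_instance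
def pvWitness_apply_updates : (List (String × List String)) × (List (String × List String)) :=
  ([("todos", ["old"]), ("a", ["1"])], [("todos", ["new"]), ("b", [])])
def Spec_apply_updates (memory : List (String × List String)) (updates : List (String × List String)) (out : List (String × List String)) : Prop := out = apply_updates_alt memory updates
instance (memory : List (String × List String)) (updates : List (String × List String)) (out : List (String × List String)) : Decidable (Spec_apply_updates memory updates out) := by unfold Spec_apply_updates; infer_instance

-- ===== CLAIM (what is proved, stated in full; the proofs are below) =====
def Claim_equal_apply_updates : Prop := ∀ (memory : List (String × List String)) (updates : List (String × List String)), Dom_apply_updates memory updates → Pre_apply_updates memory updates → Spec_apply_updates memory updates (apply_updates memory updates)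

-- ===== LEMMAS AND PROOFS =====

theorem setdefault_modify_eq_insert (d : PySem.Dict String (List String)) (k : String) (v : List String) :
    (d.setdefault k []).modify k [] (fun t => t ++ v) = d.insert k (d.getD k [] ++ v) := by
  by_cases h : d.contains k = true
  · simp [PySem.Dict.setdefault, h, PySem.Dict.modify]
  · have hany : (d.items.any fun p => p.1 == k) = false := by
      simpa only [PySem.Dict.contains, Bool.not_eq_true] using h
    have hall : ∀ p ∈ d.items, p.1 ≠ k := by
      intro p hp hpk
      exact (List.any_eq_false.mp hany p hp) (by simp [hpk])
    have hfind : d.items.find? (fun p => p.1 == k) = none :=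
      List.find?_eq_none.mpr (fun p hp => by simp [hall p hp])
    simp only [PySem.Dict.setdefault, PySem.Dict.modify, PySem.Dict.insert, PySem.Dict.getD,
      PySem.Dict.get?, PySem.Dict.contains, hany, Bool.false_eq_true,
      if_false, List.any_append, List.find?_append, hfind, Bool.false_or, Option.getD_none,
      Option.map_none]
    simp only [List.any_cons, List.any_nil, beq_self_eq_true, Bool.true_or, if_true,
      List.map_append, List.find?_cons, beq_self_eq_true]
    rw [List.map_congr_left (fun p hp => if_neg (by simp [hall p hp]) : ∀ p ∈ d.items, _ = _)]
    simp

theorem merge_loops_eq (upd : List (String × List String)) (d : PySem.Dict String (List String))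
    (t0 : List String) (h : (upd.map Prod.fst).Nodup) (ht : d.getD "todos" [] = t0) :
    upd.foldl
      (fun d kv =>
        if kv.1 == "todos" then
          ((d.setdefault "todos" []).modify "todos" [] (fun t => t ++ kv.2))
        else d.insert kv.1 kv.2) d
    = upd.foldl
      (fun d kv => d.insert kv.1 (if kv.1 == "todos" then t0 ++ kv.2 else kv.2)) d := by
  induction upd generalizing d t0 with
  | nil => rfl
  | cons kv tl ih =>
    simp only [List.map_cons, List.nodup_cons, List.mem_map] at h
    by_cases hk : kv.1 = "todos"
    · have hnot : ∀ p ∈ tl, p.1 ≠ "todos" := by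
        intro p hp hpk
        exact h.1 ⟨p, hp, hk ▸ hpk⟩
      rw [List.foldl_cons, List.foldl_cons,
        show (if (kv.1 == "todos") = true then
                (d.setdefault "todos" []).modify "todos" [] fun t => t ++ kv.2
              else d.insert kv.1 kv.2) = d.insert "todos" (t0 ++ kv.2) by
          rw [if_pos (by simp [hk]), setdefault_modify_eq_insert, ht],
        show (d.insert kv.1 (if (kv.1 == "todos") = true then t0 ++ kv.2 else kv.2))
              = d.insert "todos" (t0 ++ kv.2) by simp [hk],
        ih (d.insert "todos" (t0 ++ kv.2)) (t0 ++ kv.2) h.2 (PySem.Dict.getD_insert_self _ _ _ _)]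
      exact PySem.List.foldl_congr_mem tl _ _ _ (fun acc x hx => by
        simp [hnot x hx])
    · rw [List.foldl_cons, List.foldl_cons,
        if_neg (by simp [hk] : ¬ (kv.1 == "todos") = true),
        if_neg (by simp [hk] : ¬ (kv.1 == "todos") = true)]
      exact ih _ t0 h.2 (by rw [PySem.Dict.getD_insert]; simp [Ne.symm hk, ht])

theorem foldl_insert_items (g : String × List String → List String) :
    ∀ (upd : List (String × List String)) (d : PySem.Dict String (List String)),
      (upd.map Prod.fst).Nodup →
      (upd.foldl (fun d kv => d.insert kv.1 (g kv)) d).items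
        = d.items.map (fun p =>
            match upd.find? (fun kv => kv.1 == p.1) with
            | some kv => (p.1, g kv)
            | none => p)
          ++ (upd.filter (fun kv => !(d.contains kv.1))).map (fun kv => (kv.1, g kv)) := by
  intro upd
  induction upd with
  | nil => intro d _; simp
  | cons kv tl ih =>
    intro d h
    simp only [List.map_cons, List.nodup_cons, List.mem_map] at h
    have hnot : ∀ x ∈ tl, x.1 ≠ kv.1 := by
      intro x hx hxk; exact h.1 ⟨x, hx, hxk⟩
    have hfindtl : tl.find? (fun x => x.1 == kv.1) = none :=
      List.find?_eq_none.mpr (fun x hx => by simp [hnot x hx])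
    rw [List.foldl_cons, ih (d.insert kv.1 (g kv)) h.2]
    by_cases hc : d.contains kv.1 = true
    · rw [PySem.Dict.items_insert_of_contains _ _ hc, List.map_map]
      have hmap : ((fun p =>
            match tl.find? (fun kv => kv.1 == p.1) with
            | some kv => (p.1, g kv)
            | none => p) ∘ (fun p => if (p.1 == kv.1) = true then (kv.1, g kv) else p))
          = (fun p =>
            match (kv :: tl).find? (fun kv' => kv'.1 == p.1) with
            | some kv' => (p.1, g kv')
            | none => p) := by
        funext p
        by_cases hp : (p.1 == kv.1) = true
        · have hp' : p.1 = kv.1 := by simpa using hp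
          simp [Function.comp, hfindtl, hp']
        · have hp' : (kv.1 == p.1) = false := by
            simp at hp ⊢; exact fun e => hp e.symm
          simp [Function.comp, hp, hp']
      rw [hmap]
      have hfilt : tl.filter (fun x => !((d.insert kv.1 (g kv)).contains x.1))
          = tl.filter (fun x => !(d.contains x.1)) := by
        apply List.filter_congr
        intro x hx
        rw [PySem.Dict.contains_insert]
        simp [hnot x hx]
      rw [hfilt, List.filter_cons, show (!(d.contains kv.1)) = false by simp [hc]]
      simp
    · have hc' : d.contains kv.1 = false := by simpa using hc
      rw [PySem.Dict.items_insert_of_not_contains _ _ hc', List.map_append]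
      have hnomem : ∀ p ∈ d.items, (kv.1 == p.1) = false := by
        intro p hp
        have hany : (d.items.any fun q => q.1 == kv.1) = false := by
          simpa [PySem.Dict.contains] using hc'
        have := List.any_eq_false.mp hany p hp
        simp at this ⊢; exact fun e => this e.symm
      have hmap : d.items.map (fun p =>
            match tl.find? (fun kv => kv.1 == p.1) with
            | some kv => (p.1, g kv)
            | none => p)
          = d.items.map (fun p =>
            match (kv :: tl).find? (fun kv' => kv'.1 == p.1) with
            | some kv' => (p.1, g kv')
            | none => p) := by
        apply List.map_congr_left
        intro p hp
        simp [hnomem p hp]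
      have hfilt : tl.filter (fun x => !((d.insert kv.1 (g kv)).contains x.1))
          = tl.filter (fun x => !(d.contains x.1)) := by
        apply List.filter_congr
        intro x hx
        rw [PySem.Dict.contains_insert]
        simp [hnot x hx]
      rw [hfilt, hmap, List.filter_cons, show (!(d.contains kv.1)) = true by simp [hc']]
      simp [List.find?_cons, hfindtl]

theorem foldl_skip_eq_filter (c : String × List String → Bool) :
    ∀ (l : List (String × List String)) (M : PySem.Dict String (List String)),
      l.foldl (fun m kv => if c kv then m else m.insert kv.1 kv.2) M
        = (l.filter (fun kv => !(c kv))).foldl (fun m kv => m.insert kv.1 kv.2) M := by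
  intro l
  induction l with
  | nil => intro M; rfl
  | cons kv tl ih =>
    intro M
    by_cases h : c kv = true <;> simp [h, ih]

theorem apply_updates_eq_alt (memory updates : List (String × List String))
    (hm : (memory.map Prod.fst).Nodup) (hu : (updates.map Prod.fst).Nodup) :
    apply_updates memory updates = apply_updates_alt memory updates := by
  unfold apply_updates apply_updates_alt
  simp only []
  set u : PySem.Dict String (List String) := PySem.Dict.mk updates with hudef
  set mem : PySem.Dict String (List String) := PySem.Dict.mk memory with hmemdef
  set t0 : List String := mem.getD "todos" [] with ht0
  set bval : String × List String → List String := fun p =>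
      (if p.1 == "todos" && u.contains "todos" then p.2 ++ u.getD "todos" []
       else if u.contains p.1 then u.getD p.1 []
       else p.2) with hbval
  -- A side
  rw [merge_loops_eq updates mem t0 hu rfl,
      foldl_insert_items (fun kv => if kv.1 == "todos" then t0 ++ kv.2 else kv.2) updates mem hu]
  -- B side: merged
  have hmergeditems :
      (memory.foldl (fun m p => m.insert p.1 (bval p)) PySem.Dict.empty).items
        = memory.map (fun p => (p.1, bval p)) := by
    rw [PySem.Dict.items_foldl_insert_fresh memory Prod.fst bval PySem.Dict.empty
        (fun a _ => by simp [PySem.Dict.contains, PySem.Dict.empty]) hm]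
    rfl
  rw [foldl_skip_eq_filter (fun kv => mem.contains kv.1) updates _]
  rw [PySem.Dict.items_foldl_insert_fresh _ Prod.fst Prod.snd _
      (by
        intro a ha
        have hamem : mem.contains a.1 = false := by
          have := List.mem_filter.mp ha
          simpa using this.2
        show ((memory.foldl (fun m p => m.insert p.1 (bval p)) PySem.Dict.empty).items.any
            fun q => q.1 == a.1) = false
        rw [hmergeditems, List.any_map]
        simpa [PySem.Dict.contains, hmemdef] using hamem)
      (by
        have hsub : List.Sublist ((updates.filter (fun kv => !(mem.contains kv.1))).map Prod.fst)
            (updates.map Prod.fst) := List.filter_sublist.map Prod.fst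
        exact hu.sublist hsub)]
  rw [hmergeditems]
  -- now equate the two concatenations
  congr 1
  · -- memory-side maps
    apply List.map_congr_left
    intro p hp
    have hpmem : (p.1, p.2) ∈ mem.items := by simpa using hp
    cases hf : updates.find? (fun kv => kv.1 == p.1) with
    | none =>
      have hcontains : u.contains p.1 = false := by
        simp only [PySem.Dict.contains, hudef]
        exact List.any_eq_false.mpr (fun x hx => by
          have := List.find?_eq_none.mp hf x hx; simpa using this)
      simp only [hbval]
      by_cases hpt : p.1 = "todos"
      · rw [show u.contains "todos" = false from hpt ▸ hcontains]
        simp [hcontains]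
      · simp [hcontains, hpt]
    | some kv =>
      have hkv1 : kv.1 = p.1 := by
        have := List.find?_some hf; simpa using this
      have hkvmem : kv ∈ updates := List.mem_of_find?_eq_some hf
      have hget : u.get? p.1 = some kv.2 := by
        simp [PySem.Dict.get?, hudef, hf]
      have hgetD : u.getD p.1 [] = kv.2 := by
        simp [PySem.Dict.getD, hget]
      have hcontains : u.contains p.1 = true := by
        simp only [PySem.Dict.contains, hudef]
        exact List.any_eq_true.mpr ⟨kv, hkvmem, by simp [hkv1]⟩
      simp only [hbval]
      by_cases hpt : p.1 = "todos"
      · have hkvt : (kv.1 == "todos") = true := by simp [hkv1, hpt]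
        have hptb : (p.1 == "todos") = true := by simp [hpt]
        have ht0p : t0 = p.2 := by
          rw [ht0, ← hpt]
          exact PySem.Dict.getD_of_mem_items mem hpmem (by simpa [PySem.Dict.keys, hmemdef] using hm) []
        rw [if_pos hkvt]
        rw [show (p.1 == "todos" && u.contains "todos") = true by
              simp [hptb, hpt ▸ hcontains]]
        rw [ht0p, show u.getD "todos" [] = kv.2 from hpt ▸ hgetD]
        simp
      · have hkvt : (kv.1 == "todos") = false := by simp [hkv1, hpt]
        have hptb : (p.1 == "todos") = false := by simp [hpt]
        simp [hkvt, hptb, hcontains, hgetD]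
  · -- appended fresh keys
    apply List.map_congr_left
    intro kv hkv
    have hfresh : mem.contains kv.1 = false := by
      have := List.mem_filter.mp hkv
      simpa using this.2
    by_cases hkt : kv.1 = "todos"
    · have ht00 : t0 = [] := by
        rw [ht0]
        exact PySem.Dict.getD_of_not_contains mem [] (hkt ▸ hfresh)
      simp [hkt, ht00]
    · simp [hkt]

-- ===== VERDICT (by name: the statement is the Claim_ definition above) =====
theorem apply_updates_spec : Claim_equal_apply_updates := by
  intro memory updates _ hpre
  unfold Spec_apply_updates
  exact apply_updates_eq_alt memory updates hpre.1 hpre.2
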